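-- pv_equiv track=rewrite | github.com/AidanCurley/AdvProgModule | Week 2 Labs/Activity2 - FileProcessing.py | get_longest_entries
-- ===== SOURCE A (Python) =====
-- def get_longest_entries(doc):
--     longest_entries = []
--     for i in range(len(doc[0])):
--         max_len = 0
--         for entry in doc:
--             if len(entry[i]) > max_len:
--                 max_len = len(entry[i])
--         longest_entries.append(max_len)
--     return longest_entries
-- ===== SOURCE B (Python) =====
-- def get_longest_entries(doc):
--     result = [0] * len(doc[0])
--     for entry in doc:
--         result = [max(m, len(entry[i])) for i, m in enumerate(result)]
--     return result
-- ===== Notes on version B (the rewrite author's own statement) =====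
-- stated objective: alternative
-- what changed: Column-major nested scan (finish each column before the next) replaced by a single row-major pass maintaining a list of running per-column maxima updated row by row.
import Mathlib
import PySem

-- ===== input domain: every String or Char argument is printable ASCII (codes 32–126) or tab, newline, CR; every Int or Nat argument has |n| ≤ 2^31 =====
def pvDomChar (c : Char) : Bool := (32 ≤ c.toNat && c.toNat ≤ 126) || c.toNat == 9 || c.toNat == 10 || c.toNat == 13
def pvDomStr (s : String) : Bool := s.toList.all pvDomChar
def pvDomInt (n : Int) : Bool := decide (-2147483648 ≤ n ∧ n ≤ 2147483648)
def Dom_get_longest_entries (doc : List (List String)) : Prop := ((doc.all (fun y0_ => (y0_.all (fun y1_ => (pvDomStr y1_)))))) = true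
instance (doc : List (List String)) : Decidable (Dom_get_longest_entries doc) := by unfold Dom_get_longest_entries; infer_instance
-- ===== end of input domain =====

-- B replaces A's column-major nested scan by a single row-major pass maintaining running per-column maxima (alternative decomposition, same cost).

-- ===== PORT A =====
def get_longest_entries (doc : List (List String)) : List Int :=
  (PySem.List.pyRange 0 ((PySem.List.pyGetD doc 0 []).length : Int) 1).foldl
    (fun longest_entries i =>
      longest_entries ++
        [doc.foldl (fun max_len entry =>
            if PySem.Str.len (PySem.List.pyGetD entry i "") > max_len then
              PySem.Str.len (PySem.List.pyGetD entry i "")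
            else max_len) 0])
    []

-- ===== PORT B =====
def get_longest_entries_alt (doc : List (List String)) : List Int :=
  doc.foldl
    (fun result entry =>
      (PySem.List.enumerate result 0).map
        (fun p => max p.2 (PySem.Str.len (PySem.List.pyGetD entry p.1 ""))))
    (List.replicate (PySem.List.pyGetD doc 0 []).length 0)

-- ===== PRECONDITION & SPEC =====
-- Pre_ excludes exactly the inputs on which Python A raises IndexError: an empty doc (doc[0])
-- and a doc with a row shorter than the first row (entry[i]).
def Pre_get_longest_entries (doc : List (List String)) : Prop :=
  doc ≠ [] ∧ ∀ row ∈ doc, (doc.headD []).length ≤ row.length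
instance (doc : List (List String)) : Decidable (Pre_get_longest_entries doc) := by
  unfold Pre_get_longest_entries; infer_instance
def pvWitness_get_longest_entries : List (List String) := [["ab", "c"], ["d", "efg"]]

def Spec_get_longest_entries (doc : List (List String)) (out : List Int) : Prop := out = get_longest_entries_alt doc
instance (doc : List (List String)) (out : List Int) : Decidable (Spec_get_longest_entries doc out) := by unfold Spec_get_longest_entries; infer_instance

-- ===== CLAIM (what is proved, stated in full; the proofs are below) =====
def Claim_equal_get_longest_entries : Prop := ∀ (doc : List (List String)), Dom_get_longest_entries doc → Pre_get_longest_entries doc → Spec_get_longest_entries doc (get_longest_entries doc)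

-- ===== LEMMAS AND PROOFS =====

-- element k of one enumerate-and-map step of B
theorem pv_enum_map_getElem? (F : Int → Int → Int) :
    ∀ (res : List Int) (s : Int) (k : Nat),
      ((PySem.List.enumerate res s).map (fun p => F p.1 p.2))[k]?
        = res[k]?.map (fun v => F (s + k) v) := by
  intro res
  induction res with
  | nil => intro s k; simp [PySem.List.enumerate]
  | cons x t ih =>
    intro s k
    cases k with
    | zero => simp [PySem.List.enumerate_cons]
    | succ k =>
      have h : s + 1 + (k : Int) = s + ((k + 1 : Nat) : Int) := by push_cast; ring
      simp [PySem.List.enumerate_cons, ih (s + 1) k, h]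

-- element k of B's whole fold: the running maximum over the processed rows
theorem pv_foldB_getElem? :
    ∀ (rows : List (List String)) (res : List Int) (k : Nat),
      (rows.foldl (fun result entry =>
          (PySem.List.enumerate result 0).map
            (fun p => max p.2 (PySem.Str.len (PySem.List.pyGetD entry p.1 "")))) res)[k]?
        = res[k]?.map (fun v =>
            rows.foldl (fun m e => max m (PySem.Str.len (PySem.List.pyGetD e (k : Int) ""))) v) := by
  intro rows
  induction rows with
  | nil => intro res k; simp
  | cons e t ih =>
    intro res k
    simp only [List.foldl_cons, ih,
      pv_enum_map_getElem? (fun i v => max v (PySem.Str.len (PySem.List.pyGetD e i ""))),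
      Option.map_map, zero_add]
    rfl

-- A is the map, over column indices, of the column maximum
theorem pv_A_eq_map (doc : List (List String)) :
    get_longest_entries doc
      = (PySem.List.pyRange 0 ((PySem.List.pyGetD doc 0 []).length : Int) 1).map
          (fun i => doc.foldl (fun m e => max m (PySem.Str.len (PySem.List.pyGetD e i ""))) 0) := by
  have hmax : ∀ (c m : Int), (if c > m then c else m) = max m c := by intro c m; omega
  unfold get_longest_entries
  rw [PySem.List.foldl_append_singleton_eq_map, List.nil_append]
  exact List.map_congr_left (fun i _ => by simp only [hmax])

-- ===== VERDICT (by name: the statement is the Claim_ definition above) =====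
theorem get_longest_entries_spec : Claim_equal_get_longest_entries := by
  intro doc _ _
  unfold Spec_get_longest_entries get_longest_entries_alt
  apply List.ext_getElem?
  intro k
  rw [pv_A_eq_map, pv_foldB_getElem?]
  by_cases hk : k < (PySem.List.pyGetD doc 0 []).length
  · simp [hk]
  · simp [hk]
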